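-- pv_equiv track=rewrite | github.com/GlennGorgoth/WordCounter | countTxtAll.py | clean_line
-- ===== SOURCE A (Python) =====
-- def clean_line(raw_line):
--     '''removes all punctuation from input string and
--     returns a list of all words which have a length greater than one'''
--     if not isinstance(raw_line, str):
--         raise ValueError("Input must be a string")
--     line = raw_line.strip().lower()
--     line = list(line)
--     for index in range(len(line)): # pylint: disable=C0200
--         if line[index] < 'a' or line[index] > 'z':
--             line[index] = ' '
--     cleaned = "".join(line)
--     words = [word for word in cleaned.split() if len(word) > 1]
--     return words
-- ===== SOURCE B (Python) =====
-- def clean_line(raw_line):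
--     '''removes all punctuation from input string and
--     returns a list of all words which have a length greater than one'''
--     if not isinstance(raw_line, str):
--         raise ValueError("Input must be a string")
--     runs = []
--     cur = []
--     for c in raw_line.lower():
--         if 'a' <= c <= 'z':
--             cur.append(c)
--         else:
--             if cur:
--                 runs.append(''.join(cur))
--             cur = []
--     if cur:
--         runs.append(''.join(cur))
--     return [w for w in runs if len(w) > 1]
-- ===== Notes on version B (the rewrite author's own statement) =====
-- stated objective: alternative
-- what changed: Replaces A's mask-every-non-letter-to-space intermediate string plus whitespace split with a single left-to-right scan that collects maximal runs of lowercase letters directly.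
import Mathlib
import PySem

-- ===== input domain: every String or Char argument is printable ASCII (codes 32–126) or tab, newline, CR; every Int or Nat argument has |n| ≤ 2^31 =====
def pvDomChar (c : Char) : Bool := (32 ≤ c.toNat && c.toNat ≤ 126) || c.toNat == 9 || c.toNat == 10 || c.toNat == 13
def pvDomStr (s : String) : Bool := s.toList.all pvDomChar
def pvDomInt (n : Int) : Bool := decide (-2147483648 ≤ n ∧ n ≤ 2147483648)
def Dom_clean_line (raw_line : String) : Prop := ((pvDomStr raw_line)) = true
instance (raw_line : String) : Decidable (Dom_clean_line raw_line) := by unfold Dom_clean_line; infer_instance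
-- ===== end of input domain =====

-- B replaces A's mask-non-letters-to-space intermediate string + whitespace split by one scan collecting maximal lowercase-letter runs (alternative decomposition, same cost).

-- ===== PORT A =====
-- strip().lower(), mask every non-'a'..'z' char to ' ', join, split on whitespace, keep words of length > 1
def clean_line (raw_line : String) : List String :=
  let line := PySem.Str.lower (PySem.Str.strip raw_line)
  let masked := line.toList.map (fun c => if c < 'a' || 'z' < c then ' ' else c)
  let cleaned := String.ofList masked
  (PySem.Str.split₀ cleaned).filter (fun w => PySem.Str.len w > 1)

-- ===== PORT B =====
-- hand-port of Source B's scan loop (regex-free): `cur` collects the current letter run, flushed at each non-letter; exact step for step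
def pvFlush (cur : List Char) : List String :=
  if cur.isEmpty then [] else [String.ofList cur]

def pvRuns : List Char → List Char → List String
  | [], cur => pvFlush cur
  | c :: rest, cur =>
    if 'a' ≤ c && c ≤ 'z' then pvRuns rest (cur ++ [c])
    else pvFlush cur ++ pvRuns rest []

def clean_line_alt (raw_line : String) : List String :=
  (pvRuns (PySem.Str.lower raw_line).toList []).filter (fun w => PySem.Str.len w > 1)

-- ===== PRECONDITION & SPEC =====
def Spec_clean_line (raw_line : String) (out : List String) : Prop := out = clean_line_alt raw_line
instance (raw_line : String) (out : List String) : Decidable (Spec_clean_line raw_line out) := by unfold Spec_clean_line; infer_instance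

-- ===== CLAIM (what is proved, stated in full; the proofs are below) =====
def Claim_equal_clean_line : Prop := ∀ (raw_line : String), Dom_clean_line raw_line → Spec_clean_line raw_line (clean_line raw_line)

-- ===== LEMMAS AND PROOFS =====

-- letter-run extraction on char lists (proof-side mirror of pvRuns)
def runsL : List Char → List Char → List (List Char)
  | [], cur => if cur.isEmpty then [] else [cur]
  | c :: rest, cur =>
    if 'a' ≤ c && c ≤ 'z' then runsL rest (cur ++ [c])
    else (if cur.isEmpty then [] else [cur]) ++ runsL rest []

theorem pvRuns_eq (cs cur : List Char) :
    pvRuns cs cur = (runsL cs cur).map String.ofList := by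
  induction cs generalizing cur with
  | nil => simp only [pvRuns, runsL, pvFlush]; split <;> simp
  | cons c rest ih =>
    simp only [pvRuns, runsL]
    split
    · exact ih _
    · simp only [pvFlush, ih, List.map_append]
      split <;> simp

theorem isspace_of_letter (c : Char) (h : ('a' ≤ c && c ≤ 'z') = true) :
    PySem.Chars.isspace c = false := by
  simp only [Bool.and_eq_true, decide_eq_true_eq] at h
  obtain ⟨h1, h2⟩ := h
  have n1 : 97 ≤ c.toNat := h1
  have n2 : c.toNat ≤ 122 := h2
  simp only [PySem.Chars.isspace]
  simp only [Bool.or_eq_false_iff, Bool.and_eq_false_iff, decide_eq_false_iff_not]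
  omega

theorem notletter_of_isspace (c : Char) (h : PySem.Chars.isspace c = true) :
    ('a' ≤ c && c ≤ 'z') = false := by
  by_contra hc
  rw [Bool.not_eq_false] at hc
  rw [isspace_of_letter c hc] at h
  exact Bool.false_ne_true h

theorem isspace_lowerChar (c : Char) :
    PySem.Chars.isspace (PySem.Chars.lowerChar c) = PySem.Chars.isspace c := by
  simp only [PySem.Chars.lowerChar]
  split
  · rename_i hu
    simp only [PySem.Chars.isupper, Bool.and_eq_true, decide_eq_true_eq] at hu
    have n1 : 65 ≤ c.toNat := hu.1
    have n2 : c.toNat ≤ 90 := hu.2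
    have hv : (Char.ofNat (c.toNat + 32)).toNat = c.toNat + 32 := by
      rw [Char.toNat_ofNat, if_pos]
      exact Or.inl (by omega)
    have hL : PySem.Chars.isspace (Char.ofNat (c.toNat + 32)) = false := by
      simp only [PySem.Chars.isspace, hv]
      simp only [Bool.or_eq_false_iff, Bool.and_eq_false_iff, decide_eq_false_iff_not]
      omega
    have hR : PySem.Chars.isspace c = false := by
      simp only [PySem.Chars.isspace]
      simp only [Bool.or_eq_false_iff, Bool.and_eq_false_iff, decide_eq_false_iff_not]
      omega
    rw [hL, hR]
  · rfl

theorem go_nil (cur : List Char) (acc : List (List Char)) :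
    PySem.Chars.split₀.go [] cur acc =
      if cur.isEmpty then acc.reverse else (cur.reverse :: acc).reverse := by
  rw [PySem.Chars.split₀.go]

theorem go_cons (c : Char) (s cur : List Char) (acc : List (List Char)) :
    PySem.Chars.split₀.go (c :: s) cur acc =
      if PySem.Chars.isspace c then
        (if cur.isEmpty then PySem.Chars.split₀.go s [] acc
         else PySem.Chars.split₀.go s [] (cur.reverse :: acc))
      else PySem.Chars.split₀.go s (c :: cur) acc := by
  rw [PySem.Chars.split₀.go]

theorem go_mask (cs cur : List Char) (acc : List (List Char)) :
    PySem.Chars.split₀.go (cs.map (fun c => if c < 'a' || 'z' < c then ' ' else c)) cur acc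
      = acc.reverse ++ runsL cs cur.reverse := by
  induction cs generalizing cur acc with
  | nil =>
    rw [List.map_nil, go_nil]
    simp only [runsL]
    split <;> simp_all
  | cons c rest ih =>
    rw [List.map_cons]
    simp only [runsL]
    by_cases hl : ('a' ≤ c && c ≤ 'z') = true
    · have hmask : (if c < 'a' || 'z' < c then ' ' else c) = c := by
        simp only [Bool.and_eq_true, decide_eq_true_eq] at hl
        simp [not_lt.mpr hl.1, not_lt.mpr hl.2]
      rw [hmask, go_cons, if_neg (by simp [isspace_of_letter c hl]), if_pos hl,
        ih (c :: cur) acc]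
      simp
    · have hl' : ('a' ≤ c && c ≤ 'z') = false := Bool.eq_false_iff.mpr hl
      have hmask : (if c < 'a' || 'z' < c then ' ' else c) = ' ' := by
        simp only [Bool.and_eq_true, decide_eq_true_eq, not_and_or, not_le] at hl
        rcases hl with h | h <;> simp [h]
      rw [hmask, if_neg (by simp [hl']), go_cons, if_pos (by decide)]
      by_cases hcur : cur = []
      · subst hcur
        rw [if_pos (by decide), ih [] acc]
        simp
      · rw [if_neg (by simp [hcur]), ih [] (cur.reverse :: acc)]
        simp [hcur]

theorem runsL_append_single (xs : List Char) (c : Char) (cur : List Char)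
    (h : ('a' ≤ c && c ≤ 'z') = false) :
    runsL (xs ++ [c]) cur = runsL xs cur := by
  induction xs generalizing cur with
  | nil => simp [runsL, h]
  | cons x rest ih =>
    simp only [List.cons_append, runsL]
    split
    · exact ih _
    · rw [ih []]

theorem runsL_append_nonletters (t : List Char) (h : ∀ c ∈ t, ('a' ≤ c && c ≤ 'z') = false)
    (xs cur : List Char) : runsL (xs ++ t) cur = runsL xs cur := by
  induction t generalizing xs with
  | nil => simp
  | cons c rest ih =>
    have : xs ++ c :: rest = (xs ++ [c]) ++ rest := by simp
    rw [this, ih (fun d hd => h d (List.mem_cons_of_mem _ hd)),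
        runsL_append_single xs c cur (h c (List.mem_cons_self))]

theorem runsL_front_nonletters (t : List Char) (h : ∀ c ∈ t, ('a' ≤ c && c ≤ 'z') = false)
    (xs : List Char) : runsL (t ++ xs) [] = runsL xs [] := by
  induction t with
  | nil => simp
  | cons c rest ih =>
    rw [List.cons_append]
    simp only [runsL]
    rw [if_neg (by simp [h c List.mem_cons_self]), if_pos (by decide), List.nil_append]
    exact ih fun d hd => h d (List.mem_cons_of_mem _ hd)

theorem runsL_lower_strip (cs : List Char) :
    runsL (PySem.Chars.lower (PySem.Chars.strip cs)) [] = runsL (PySem.Chars.lower cs) [] := by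
  have hnl : ∀ (d : Char), PySem.Chars.isspace d = true →
      ('a' ≤ PySem.Chars.lowerChar d && PySem.Chars.lowerChar d ≤ 'z') = false := by
    intro d hd
    exact notletter_of_isspace _ ((isspace_lowerChar d).trans hd)
  have hfront : PySem.Chars.lower cs
      = (List.takeWhile PySem.Chars.isspace cs).map PySem.Chars.lowerChar
        ++ PySem.Chars.lower (PySem.Chars.lstrip cs) := by
    simp only [PySem.Chars.lower, PySem.Chars.lstrip, ← List.map_append,
      List.takeWhile_append_dropWhile]
  have hback : PySem.Chars.lower (PySem.Chars.lstrip cs)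
      = PySem.Chars.lower (PySem.Chars.strip cs)
        ++ (List.takeWhile PySem.Chars.isspace
            (PySem.Chars.lstrip cs).reverse).reverse.map PySem.Chars.lowerChar := by
    simp only [PySem.Chars.lower, PySem.Chars.strip, PySem.Chars.rstrip, ← List.map_append]
    congr 1
    conv_lhs => rw [← List.reverse_reverse (PySem.Chars.lstrip cs),
      ← List.takeWhile_append_dropWhile (p := PySem.Chars.isspace)
        (l := (PySem.Chars.lstrip cs).reverse)]
    rw [List.reverse_append]
  have hA : ∀ c ∈ (List.takeWhile PySem.Chars.isspace cs).map PySem.Chars.lowerChar,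
      ('a' ≤ c && c ≤ 'z') = false := by
    intro c hc
    rw [List.mem_map] at hc
    obtain ⟨d, hd, rfl⟩ := hc
    exact hnl d (List.mem_takeWhile_imp hd)
  have hB : ∀ c ∈ (List.takeWhile PySem.Chars.isspace
        (PySem.Chars.lstrip cs).reverse).reverse.map PySem.Chars.lowerChar,
      ('a' ≤ c && c ≤ 'z') = false := by
    intro c hc
    rw [List.mem_map] at hc
    obtain ⟨d, hd, rfl⟩ := hc
    exact hnl d (List.mem_takeWhile_imp (by simpa using hd))
  conv_rhs => rw [hfront, hback]
  rw [runsL_front_nonletters _ hA, runsL_append_nonletters _ hB]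

-- ===== VERDICT (by name: the statement is the Claim_ definition above) =====
theorem clean_line_spec : Claim_equal_clean_line := by
  intro raw _
  show clean_line raw = clean_line_alt raw
  unfold clean_line clean_line_alt
  rw [pvRuns_eq]
  simp only [PySem.Str.split₀, PySem.Str.lower, PySem.Str.strip, String.toList_ofList]
  rw [show PySem.Chars.split₀
        ((PySem.Chars.lower (PySem.Chars.strip raw.toList)).map
          (fun c => if c < 'a' || 'z' < c then ' ' else c)) =
      runsL (PySem.Chars.lower (PySem.Chars.strip raw.toList)) [] by
    simpa using go_mask (PySem.Chars.lower (PySem.Chars.strip raw.toList)) [] []]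
  rw [runsL_lower_strip]
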